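-- pv_equiv track=rewrite | github.com/rrwt/daily-coding-challenge | daily_problems/problem_101_to_200/problem_175.py | _construct_transition_dict
-- ===== SOURCE A (Python) =====
-- from collections import defaultdict
--
-- def _construct_transition_dict(transitions: list) -> dict:
--     td = defaultdict(list)
--
--     for (start, end, val) in transitions:
--         if start in td:
--             td[start][0].append(end)
--             td[start][1].append(val + td[start][1][-1])
--         else:
--             td[start] = [[end], [val]]
--
--     return td
-- ===== SOURCE B (Python) =====
-- from collections import defaultdict
-- from itertools import accumulate
--
--
-- def _construct_transition_dict(transitions: list) -> dict:
--     # Pass 1: group ends and raw vals per start, in encounter order.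
--     groups = {}
--     for start, end, val in transitions:
--         if start not in groups:
--             groups[start] = ([], [])
--         ends, vals = groups[start]
--         ends.append(end)
--         vals.append(val)
--     # Pass 2: replace raw vals by their running prefix sums.
--     td = defaultdict(list)
--     for start, (ends, vals) in groups.items():
--         td[start] = [ends, list(accumulate(vals))]
--     return td
-- ===== Notes on version B (the rewrite author's own statement) =====
-- stated objective: simpler
-- what changed: A builds ends and prefix sums incrementally in one interleaved loop with in-place appends keyed by repeated dict lookups; B first groups raw (end, val) pairs per start and then derives the prefix sums in a separate accumulate pass.
import Mathlib
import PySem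

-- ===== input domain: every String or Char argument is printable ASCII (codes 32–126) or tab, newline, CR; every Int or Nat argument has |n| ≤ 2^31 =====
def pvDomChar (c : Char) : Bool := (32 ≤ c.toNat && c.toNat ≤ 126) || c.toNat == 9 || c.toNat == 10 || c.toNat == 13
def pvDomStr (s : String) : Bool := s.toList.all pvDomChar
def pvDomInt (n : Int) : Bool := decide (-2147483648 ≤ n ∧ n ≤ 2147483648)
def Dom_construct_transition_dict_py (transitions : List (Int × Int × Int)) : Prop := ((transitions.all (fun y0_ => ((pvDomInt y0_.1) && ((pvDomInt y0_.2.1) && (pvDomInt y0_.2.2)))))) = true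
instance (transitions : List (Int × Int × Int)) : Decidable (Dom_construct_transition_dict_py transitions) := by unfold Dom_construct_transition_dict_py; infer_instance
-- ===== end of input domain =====

-- B replaces A's single interleaved loop (in-place appends with repeated lookups) by a
-- grouping pass over raw values followed by a separate prefix-sum (accumulate) pass: simpler.


-- ===== PORT A =====
-- one loop iteration of A; 'td[start][1][-1]' is the last element of the vals list
-- (the `.getD` defaults are unreachable: every stored value has shape [ends, vals] with vals ≠ [])
def pvStepA (td : PySem.Dict Int (List (List Int))) (t : Int × Int × Int) :
    PySem.Dict Int (List (List Int)) :=
  match td.get? t.1 with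
  | some ls =>
      let ends := ls.getD 0 []
      let vals := ls.getD 1 []
      td.insert t.1 [ends ++ [t.2.1], vals ++ [t.2.2 + (vals.getLast?).getD 0]]
  | none => td.insert t.1 [[t.2.1], [t.2.2]]

def construct_transition_dict_py (transitions : List (Int × Int × Int)) :
    List (Int × List (List Int)) :=
  (transitions.foldl pvStepA PySem.Dict.empty).items

-- ===== PORT B =====
-- itertools.accumulate with running total a
def pvAccumFrom (a : Int) : List Int → List Int
  | [] => []
  | v :: rest => (a + v) :: pvAccumFrom (a + v) rest

def pvAccum (vs : List Int) : List Int := pvAccumFrom 0 vs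

-- pass 1 loop body: append (end, val) to start's group
def pvStepB (g : PySem.Dict Int (List Int × List Int)) (t : Int × Int × Int) :
    PySem.Dict Int (List Int × List Int) :=
  let p := (g.get? t.1).getD ([], [])
  g.insert t.1 (p.1 ++ [t.2.1], p.2 ++ [t.2.2])

def construct_transition_dict_py_alt (transitions : List (Int × Int × Int)) :
    List (Int × List (List Int)) :=
  let groups := transitions.foldl pvStepB PySem.Dict.empty
  (groups.items.foldl
      (fun (td : PySem.Dict Int (List (List Int))) p =>
        td.insert p.1 [p.2.1, pvAccum p.2.2])
      PySem.Dict.empty).items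

-- ===== PRECONDITION & SPEC =====
def Spec_construct_transition_dict_py (transitions : List (Int × Int × Int)) (out : List (Int × List (List Int))) : Prop := out = construct_transition_dict_py_alt transitions
instance (transitions : List (Int × Int × Int)) (out : List (Int × List (List Int))) : Decidable (Spec_construct_transition_dict_py transitions out) := by unfold Spec_construct_transition_dict_py; infer_instance

-- ===== CLAIM (what is proved, stated in full; the proofs are below) =====
def Claim_equal_construct_transition_dict_py : Prop := ∀ (transitions : List (Int × Int × Int)), Dom_construct_transition_dict_py transitions → Spec_construct_transition_dict_py transitions (construct_transition_dict_py transitions)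

-- ===== LEMMAS AND PROOFS =====

-- conv: B's grouped value to A's stored value
def pvConv (p : Int × (List Int × List Int)) : Int × List (List Int) :=
  (p.1, [p.2.1, pvAccum p.2.2])

def pvMapD (g : PySem.Dict Int (List Int × List Int)) : PySem.Dict Int (List (List Int)) :=
  PySem.Dict.mk (g.items.map pvConv)

theorem pvFind?_map_conv (l : List (Int × (List Int × List Int))) (k : Int) :
    (l.map pvConv).find? (fun p => p.1 == k)
      = (l.find? (fun p => p.1 == k)).map pvConv := by
  induction l with
  | nil => rfl
  | cons h t ih =>
      obtain ⟨k1, rest⟩ := h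
      by_cases hk : k1 = k
      · simp [List.find?, pvConv, hk]
      · have hb : (k1 == k) = false := by simp [hk]
        simp [List.find?, pvConv, hb, ih]

theorem pvGet?_mapD (g : PySem.Dict Int (List Int × List Int)) (k : Int) :
    (pvMapD g).get? k = (g.get? k).map (fun v => [v.1, pvAccum v.2]) := by
  simp only [pvMapD, PySem.Dict.get?, pvFind?_map_conv]
  cases g.items.find? (fun p => p.1 == k) <;> simp [pvConv]

theorem pvContains_mapD (g : PySem.Dict Int (List Int × List Int)) (k : Int) :
    (pvMapD g).contains k = g.contains k := by
  rw [PySem.Dict.contains_eq_isSome_get?, PySem.Dict.contains_eq_isSome_get?, pvGet?_mapD]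
  cases g.get? k <;> rfl

theorem pvInsert_mapD (g : PySem.Dict Int (List Int × List Int)) (k : Int)
    (v : List Int × List Int) :
    pvMapD (g.insert k v) = (pvMapD g).insert k [v.1, pvAccum v.2] := by
  have hc := pvContains_mapD g k
  unfold pvMapD at hc ⊢
  simp only [PySem.Dict.insert, hc]
  split
  · congr 1
    rw [List.map_map, List.map_map]
    apply List.map_congr_left
    intro p _
    by_cases hk : p.1 = k <;> simp [pvConv, hk, Function.comp]
  · congr 1
    rw [List.map_append]
    rfl

theorem pvAccumFrom_append (a v : Int) (vs : List Int) :
    pvAccumFrom a (vs ++ [v]) = pvAccumFrom a vs ++ [a + vs.sum + v] := by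
  induction vs generalizing a with
  | nil => simp [pvAccumFrom]
  | cons h t ih =>
      simp only [List.cons_append, pvAccumFrom, ih, List.sum_cons]
      have : a + h + t.sum + v = a + (h + t.sum) + v := by ring
      rw [this]

theorem pvAccumFrom_last (a : Int) (vs : List Int) (h : vs ≠ []) :
    (pvAccumFrom a vs).getLast? = some (a + vs.sum) := by
  induction vs generalizing a with
  | nil => exact absurd rfl h
  | cons hd t ih =>
      cases t with
      | nil => simp [pvAccumFrom]
      | cons h2 t2 =>
          rw [show pvAccumFrom a (hd :: h2 :: t2)
                = (a + hd) :: ((a + hd + h2) :: pvAccumFrom (a + hd + h2) t2) from rfl,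
              List.getLast?_cons_cons,
              show (a + hd + h2) :: pvAccumFrom (a + hd + h2) t2
                = pvAccumFrom (a + hd) (h2 :: t2) from rfl,
              ih (a + hd) (by simp)]
          congr 1
          simp only [List.sum_cons]
          ring

theorem pvAccum_append (v : Int) (vs : List Int) :
    pvAccum (vs ++ [v]) = pvAccum vs ++ [v + ((pvAccum vs).getLast?).getD 0] := by
  unfold pvAccum
  rw [pvAccumFrom_append]
  cases hvs : vs with
  | nil => simp [pvAccumFrom]
  | cons h t =>
      rw [pvAccumFrom_last 0 (h :: t) (by simp)]
      simp only [Option.getD_some]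
      congr 2
      ring

theorem pvStep_comm (g : PySem.Dict Int (List Int × List Int)) (t : Int × Int × Int) :
    pvStepA (pvMapD g) t = pvMapD (pvStepB g t) := by
  unfold pvStepA pvStepB
  rw [pvGet?_mapD]
  cases hg : g.get? t.1 with
  | none =>
      simp only [Option.map_none, Option.getD_none, pvInsert_mapD]
      simp [pvAccum, pvAccumFrom]
  | some v =>
      simp only [Option.map_some, Option.getD_some, pvInsert_mapD]
      simp [List.getD, pvAccum_append]

theorem pvFold_comm (ts : List (Int × Int × Int)) (g : PySem.Dict Int (List Int × List Int)) :
    ts.foldl pvStepA (pvMapD g) = pvMapD (ts.foldl pvStepB g) := by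
  induction ts generalizing g with
  | nil => rfl
  | cons h t ih => rw [List.foldl_cons, List.foldl_cons, pvStep_comm, ih]

theorem pvMapD_empty : pvMapD PySem.Dict.empty = PySem.Dict.empty := rfl

-- ===== VERDICT (by name: the statement is the Claim_ definition above) =====
theorem construct_transition_dict_py_spec : Claim_equal_construct_transition_dict_py := by
  intro ts _
  unfold Spec_construct_transition_dict_py construct_transition_dict_py construct_transition_dict_py_alt
  have hA : ts.foldl pvStepA PySem.Dict.empty = pvMapD (ts.foldl pvStepB PySem.Dict.empty) := by
    rw [← pvMapD_empty, pvFold_comm]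
  rw [hA]
  set g := ts.foldl pvStepB PySem.Dict.empty with hg
  have hnd : g.keys.Nodup := by
    rw [hg]
    exact PySem.Dict.nodup_keys_foldl_insert_key ts (fun t => t.1)
      (fun g t => (((g.get? t.1).getD ([], [])).1 ++ [t.2.1], ((g.get? t.1).getD ([], [])).2 ++ [t.2.2]))
      PySem.Dict.empty PySem.Dict.nodup_keys_empty
  show (pvMapD g).items
    = (List.foldl (fun td p => td.insert p.1 [p.2.1, pvAccum p.2.2]) PySem.Dict.empty g.items).items
  rw [PySem.Dict.items_foldl_insert_fresh g.items (fun p => p.1)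
        (fun p => [p.2.1, pvAccum p.2.2]) PySem.Dict.empty (by intro a _; rfl)
        (by simpa [PySem.Dict.keys] using hnd)]
  rfl
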